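-- pv_equiv track=rewrite | github.com/hallu0317/Python_Study | Programmers/Lv2/짝지어 제거하기.py | solution
-- ===== SOURCE A (Python) =====
-- def solution(s):
--     answer = 0
--     stack = []
--
--     for i in s:
--         if len(stack) == 0:
--             stack.append(i)
--         else:
--             if i == stack[-1]:
--                 stack.pop()
--             else:
--                 stack.append(i)
--
--     if len(stack) == 0:
--         return 1
--
--     return answer
-- ===== SOURCE B (Python) =====
-- def solution(s):
--     # Repeatedly delete non-overlapping adjacent equal pairs until fixpoint.
--     while True:
--         t = []
--         i = 0
--         n = len(s)
--         while i < n: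
--             if i + 1 < n and s[i] == s[i + 1]:
--                 i += 2
--             else:
--                 t.append(s[i])
--                 i += 1
--         t = ''.join(t)
--         if t == s:
--             return 1 if s == '' else 0
--         s = t
-- ===== Notes on version B (the rewrite author's own statement) =====
-- stated objective: alternative
-- what changed: B repeatedly deletes the non-overlapping adjacent equal pairs found in one left-to-right scan until the string reaches a fixpoint, instead of A's single stack pass; confluence of adjacent-pair removal makes the fixpoint empty exactly when the stack empties.
import Mathlib
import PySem

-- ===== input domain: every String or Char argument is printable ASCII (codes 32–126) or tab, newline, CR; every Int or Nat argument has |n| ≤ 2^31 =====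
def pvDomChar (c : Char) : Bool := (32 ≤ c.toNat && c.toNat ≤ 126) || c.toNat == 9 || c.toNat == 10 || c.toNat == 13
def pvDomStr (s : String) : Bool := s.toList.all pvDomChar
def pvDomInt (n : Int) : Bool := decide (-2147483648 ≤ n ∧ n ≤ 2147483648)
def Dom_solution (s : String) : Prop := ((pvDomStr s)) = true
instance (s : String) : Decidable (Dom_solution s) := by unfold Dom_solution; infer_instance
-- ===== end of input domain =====

-- B replaces A's single stack pass by repeated deletion of adjacent equal pairs to a fixpoint (alternative algorithm, not claimed faster).

-- ===== PORT A =====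
-- the loop body of A: empty stack → push; top equal → pop; otherwise push (stack kept in Python order, top = last)
def solStep (st : List Char) (i : Char) : List Char :=
  if st.length = 0 then st ++ [i]
  else if PySem.List.pyGet? st (-1) = some i then st.dropLast
  else st ++ [i]

def solution (s : String) : Int :=
  let stack := s.toList.foldl solStep []
  if stack.length = 0 then 1 else 0

-- ===== PORT B =====
-- one left-to-right scan of Source B's inner while loop: drop each non-overlapping adjacent equal pair, keep the rest
def passOnce : List Char → List Char
  | [] => []
  | [a] => [a]
  | a :: b :: rest => if a = b then passOnce rest else a :: passOnce (b :: rest)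

theorem passOnce_length_le : ∀ l : List Char, (passOnce l).length ≤ l.length := by
  intro l
  induction l using passOnce.induct with
  | case1 => simp [passOnce]
  | case2 a => simp [passOnce]
  | case3 b rest ih => simp [passOnce]; omega
  | case4 a b rest h ih =>
      rw [passOnce, if_neg h]
      simp only [List.length_cons] at ih ⊢
      omega

theorem passOnce_length_lt : ∀ l : List Char, passOnce l ≠ l → (passOnce l).length < l.length := by
  intro l
  induction l using passOnce.induct with
  | case1 => simp [passOnce]
  | case2 a => simp [passOnce]
  | case3 b rest ih =>
      intro _
      have := passOnce_length_le rest
      simp [passOnce]; omega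
  | case4 a b rest h ih =>
      intro hne
      have hbr : passOnce (b :: rest) ≠ b :: rest := by
        intro he; apply hne; simp [passOnce, h, he]
      have hlt := ih hbr
      rw [passOnce, if_neg h]
      simp only [List.length_cons] at hlt ⊢
      omega

-- Source B's outer while loop: iterate passOnce to a fixpoint
def passFix (l : List Char) : List Char :=
  if h : passOnce l = l then l else passFix (passOnce l)
termination_by l.length
decreasing_by exact passOnce_length_lt l h

def solution_alt (s : String) : Int :=
  if passFix s.toList = [] then 1 else 0

-- ===== PRECONDITION & SPEC =====
def Spec_solution (s : String) (out : Int) : Prop := out = solution_alt s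
instance (s : String) (out : Int) : Decidable (Spec_solution s out) := by unfold Spec_solution; infer_instance

-- ===== CLAIM (what is proved, stated in full; the proofs are below) =====
def Claim_equal_solution : Prop := ∀ (s : String), Dom_solution s → Spec_solution s (solution s)

-- ===== LEMMAS AND PROOFS =====

-- the canonical normal form of adjacent-pair cancellation, computed from the right
def rc1 (c : Char) (r : List Char) : List Char :=
  match r with
  | [] => [c]
  | t :: rr => if c = t then rr else c :: t :: rr

def reduce : List Char → List Char
  | [] => []
  | c :: cs => rc1 c (reduce cs)

-- the same cancellation step acting on the right end of the list
def gsnoc : List Char → Char → List Char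
  | [], c => [c]
  | [t], c => if t = c then [] else [t, c]
  | t :: m :: r, c => t :: gsnoc (m :: r) c

theorem solStep_cons_cons (t m : Char) (r : List Char) (i : Char) :
    solStep (t :: m :: r) i = t :: solStep (m :: r) i := by
  simp only [solStep, PySem.List.pyGet?_neg_one, List.getLast?_cons_cons]
  by_cases h : (m :: r).getLast? = some i <;>
    simp [h, List.dropLast]

theorem solStep_eq_gsnoc : ∀ (st : List Char) (i : Char), solStep st i = gsnoc st i
  | [], i => by simp [solStep, gsnoc]
  | [t], i => by
      simp only [solStep, gsnoc, PySem.List.pyGet?_neg_one]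
      by_cases h : t = i <;> simp [h, List.getLast?]
  | t :: m :: r, i => by
      rw [solStep_cons_cons, solStep_eq_gsnoc (m :: r) i, gsnoc]

theorem rc1_gsnoc_comm : ∀ (r : List Char) (x c : Char),
    rc1 x (gsnoc r c) = gsnoc (rc1 x r) c := by
  intro r x c
  match r with
  | [] =>
      by_cases h : x = c <;> simp [rc1, gsnoc, h]
  | [t] =>
      by_cases h1 : t = c <;> by_cases h2 : x = t <;>
        simp_all [rc1, gsnoc]
  | t :: m :: rr =>
      by_cases h : x = t <;> simp [rc1, gsnoc, h]

theorem reduce_snoc : ∀ (l : List Char) (c : Char),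
    reduce (l ++ [c]) = gsnoc (reduce l) c := by
  intro l c
  induction l with
  | nil => simp [reduce, rc1, gsnoc]
  | cons x l ih => simp [reduce, ih, rc1_gsnoc_comm]

theorem foldl_solStep_eq_reduce : ∀ l : List Char, l.foldl solStep [] = reduce l := by
  intro l
  induction l using List.reverseRecOn with
  | nil => simp [reduce]
  | append_singleton l c ih =>
      rw [List.foldl_append, List.foldl_cons, List.foldl_nil, ih,
          solStep_eq_gsnoc, reduce_snoc]

-- no two adjacent characters equal
def NoAdj : List Char → Prop
  | [] => True
  | [_] => True
  | a :: b :: r => a ≠ b ∧ NoAdj (b :: r)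

theorem noAdj_tail : ∀ (a : Char) (l : List Char), NoAdj (a :: l) → NoAdj l := by
  intro a l h
  match l with
  | [] => trivial
  | b :: r => exact h.2

theorem reduce_noadj : ∀ l : List Char, NoAdj (reduce l) := by
  intro l
  induction l with
  | nil => trivial
  | cons c cs ih =>
      simp only [reduce]
      match h : reduce cs with
      | [] => exact trivial
      | t :: rr =>
          rw [h] at ih
          by_cases hc : c = t
          · simpa [rc1, hc] using noAdj_tail t rr ih
          · rw [show rc1 c (t :: rr) = c :: t :: rr by simp [rc1, hc]]
            exact ⟨hc, ih⟩

theorem rc1_rc1 : ∀ (r : List Char) (c : Char), NoAdj r → rc1 c (rc1 c r) = r := by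
  intro r c hr
  match r with
  | [] => simp [rc1]
  | t :: rr =>
      by_cases hc : c = t
      · subst hc
        match rr with
        | [] => simp [rc1]
        | u :: rr2 =>
            have hne : c ≠ u := hr.1
            simp [rc1, hne]
      · simp [rc1, hc]

theorem reduce_passOnce : ∀ l : List Char, reduce (passOnce l) = reduce l := by
  intro l
  induction l using passOnce.induct with
  | case1 => rfl
  | case2 a => rfl
  | case3 b rest ih =>
      rw [passOnce, if_pos rfl, ih]
      show reduce rest = rc1 b (rc1 b (reduce rest))
      rw [rc1_rc1 _ _ (reduce_noadj rest)]
  | case4 a b rest h ih =>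
      rw [passOnce, if_neg h]
      show rc1 a (reduce (passOnce (b :: rest))) = rc1 a (reduce (b :: rest))
      rw [ih]

theorem passOnce_id_noadj : ∀ l : List Char, passOnce l = l → NoAdj l := by
  intro l
  induction l using passOnce.induct with
  | case1 => intro _; trivial
  | case2 a => intro _; trivial
  | case3 b rest ih =>
      intro he
      exfalso
      rw [passOnce, if_pos rfl] at he
      have h1 := passOnce_length_le rest
      have h2 : (passOnce rest).length = (b :: b :: rest).length := by rw [he]
      simp at h2; omega
  | case4 a b rest h ih =>
      intro he
      rw [passOnce, if_neg h] at he
      have htail : passOnce (b :: rest) = b :: rest := by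
        exact (List.cons_inj_right a).mp he
      exact ⟨h, ih htail⟩

theorem reduce_of_noadj : ∀ l : List Char, NoAdj l → reduce l = l := by
  intro l hl
  induction l with
  | nil => rfl
  | cons c cs ih =>
      rw [reduce, ih (noAdj_tail c cs hl)]
      match cs, hl with
      | [], _ => rfl
      | t :: rr, hl => simp [rc1, hl.1]

theorem reduce_passFix : ∀ l : List Char, reduce (passFix l) = reduce l := by
  intro l
  induction l using passFix.induct with
  | case1 l h => rw [passFix, dif_pos h]
  | case2 l h ih => rw [passFix, dif_neg h, ih, reduce_passOnce]

theorem passFix_fixed : ∀ l : List Char, passOnce (passFix l) = passFix l := by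
  intro l
  induction l using passFix.induct with
  | case1 l h => rw [passFix, dif_pos h]; exact h
  | case2 l h ih => rw [passFix, dif_neg h]; exact ih

theorem passFix_eq_reduce : ∀ l : List Char, passFix l = reduce l := by
  intro l
  have h1 : NoAdj (passFix l) := passOnce_id_noadj _ (passFix_fixed l)
  have h2 := reduce_of_noadj _ h1
  rw [← h2, reduce_passFix]

-- ===== VERDICT (by name: the statement is the Claim_ definition above) =====
theorem solution_spec : Claim_equal_solution := by
  intro s _
  unfold Spec_solution solution solution_alt
  rw [foldl_solStep_eq_reduce, ← passFix_eq_reduce]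
  by_cases h : passFix s.toList = [] <;> simp [h]
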